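-- pv_equiv track=rewrite | github.com/plturrell/finsightdeep_mctx_enterprise | mctx/_src/distributed.py | shard_batch
-- ===== SOURCE A (Python) =====
-- from typing import Any, Callable, Dict, List, NamedTuple, Optional, Tuple, TypeVar, Union
--
-- def shard_batch(
--     batch_size: int,
--     num_devices: int) -> List[Tuple[int, int]]:
--   """Calculate batch sharding across devices.
--
--   Args:
--     batch_size: Size of the batch.
--     num_devices: Number of devices.
--
--   Returns:
--     List of (start, end) tuples for each device.
--   """
--   batch_per_device = batch_size // num_devices
--   remaining_batch = batch_size % num_devices
--
--   shards = []
--   start = 0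
--   for i in range(num_devices):
--     device_batch = batch_per_device + (1 if i < remaining_batch else 0)
--     end = start + device_batch
--     shards.append((start, end))
--     start = end
--
--   return shards
-- ===== SOURCE B (Python) =====
-- def shard_batch(
--     batch_size: int,
--     num_devices: int) -> "List[Tuple[int, int]]":
--   q = batch_size // num_devices
--   r = batch_size % num_devices
--   return [(i * q + min(i, r), (i + 1) * q + min(i + 1, r))
--           for i in range(num_devices)]
-- ===== Notes on version B (the rewrite author's own statement) =====
-- stated objective: simpler
-- what changed: Replaced the stateful loop carrying a running start accumulator with a stateless comprehension computing each shard's (start, end) by the closed form i*q + min(i, r).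
import Mathlib
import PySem

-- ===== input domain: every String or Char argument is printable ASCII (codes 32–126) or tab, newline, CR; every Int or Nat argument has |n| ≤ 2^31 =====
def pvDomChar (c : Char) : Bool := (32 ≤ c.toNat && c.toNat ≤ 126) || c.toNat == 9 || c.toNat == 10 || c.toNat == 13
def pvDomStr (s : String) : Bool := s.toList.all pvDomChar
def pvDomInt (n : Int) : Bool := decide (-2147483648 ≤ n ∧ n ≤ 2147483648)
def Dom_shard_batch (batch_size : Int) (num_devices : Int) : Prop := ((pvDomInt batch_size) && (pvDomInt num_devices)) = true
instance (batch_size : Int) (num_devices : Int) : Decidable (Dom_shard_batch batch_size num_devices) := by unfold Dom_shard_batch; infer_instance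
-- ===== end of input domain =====

-- B replaces A's stateful loop (running `start`) by a stateless per-index closed form; objective: simpler.

-- ===== PORT A =====
-- literal port of A: compute q = bs // nd, r = bs % nd, then a fold over range(nd)
-- carrying (shards, start), appending (start, start + device_batch) each step.
def shard_batch (batch_size : Int) (num_devices : Int) : List (Int × Int) :=
  let batch_per_device := PySem.Int.floordiv batch_size num_devices
  let remaining_batch := PySem.Int.mod batch_size num_devices
  let res := (PySem.List.pyRange 0 num_devices 1).foldl
    (fun (acc : List (Int × Int) × Int) i =>
      let device_batch := batch_per_device + (if i < remaining_batch then 1 else 0)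
      let e := acc.2 + device_batch
      (acc.1 ++ [(acc.2, e)], e)) ([], 0)
  res.1

-- ===== PORT B =====
-- literal port of B: map the closed form over range(nd).
def shard_batch_alt (batch_size : Int) (num_devices : Int) : List (Int × Int) :=
  let q := PySem.Int.floordiv batch_size num_devices
  let r := PySem.Int.mod batch_size num_devices
  (PySem.List.pyRange 0 num_devices 1).map
    (fun i => (i * q + min i r, (i + 1) * q + min (i + 1) r))

-- ===== PRECONDITION & SPEC =====
-- Pre_ excludes exactly num_devices = 0, where Python A (and B) raise ZeroDivisionError.
def Pre_shard_batch (batch_size : Int) (num_devices : Int) : Prop := num_devices ≠ 0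
instance (batch_size : Int) (num_devices : Int) : Decidable (Pre_shard_batch batch_size num_devices) := by unfold Pre_shard_batch; infer_instance
def pvWitness_shard_batch : Int × Int := (7, 3)

def Spec_shard_batch (batch_size : Int) (num_devices : Int) (out : List (Int × Int)) : Prop := out = shard_batch_alt batch_size num_devices
instance (batch_size : Int) (num_devices : Int) (out : List (Int × Int)) : Decidable (Spec_shard_batch batch_size num_devices out) := by unfold Spec_shard_batch; infer_instance

-- ===== CLAIM (what is proved, stated in full; the proofs are below) =====
def Claim_equal_shard_batch : Prop := ∀ (batch_size : Int) (num_devices : Int), Dom_shard_batch batch_size num_devices → Pre_shard_batch batch_size num_devices → Spec_shard_batch batch_size num_devices (shard_batch batch_size num_devices)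

-- ===== LEMMAS AND PROOFS =====

-- arithmetic step: the closed-form start advances by one device batch.
lemma shard_step_eq (q r i : Int) :
    i * q + min i r + (q + (if i < r then 1 else 0)) = (i + 1) * q + min (i + 1) r := by
  have h : (i + 1) * q = i * q + q := by ring
  rw [h]
  generalize i * q = a
  split_ifs with hc <;> omega

-- loop invariant: A's fold over range(n) produces exactly B's map, and the carried
-- start equals n*q + min n r (needs 0 ≤ r for the base case min 0 r = 0).
lemma shard_loop_eq (q r : Int) (hr : 0 ≤ r) (n : Nat) :
    (PySem.List.pyRange 0 (n : Int) 1).foldl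
      (fun (acc : List (Int × Int) × Int) i =>
        let device_batch := q + (if i < r then 1 else 0)
        let e := acc.2 + device_batch
        (acc.1 ++ [(acc.2, e)], e)) ([], 0)
    = ((PySem.List.pyRange 0 (n : Int) 1).map
        (fun i => (i * q + min i r, (i + 1) * q + min (i + 1) r)),
       (n : Int) * q + min (n : Int) r) := by
  induction n with
  | zero =>
      simp [PySem.List.pyRange_one_eq_nil (by omega : (0:Int) ≤ 0)]
      omega
  | succ n ih =>
      have hsplit : PySem.List.pyRange 0 ((n + 1 : Nat) : Int) 1
          = PySem.List.pyRange 0 (n : Int) 1 ++ [(n : Int)] := by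
        have := PySem.List.pyRange_one_succ_right (a := 0) (b := (n : Int)) (by positivity)
        push_cast
        exact this
      rw [hsplit, List.foldl_append, List.map_append, ih]
      have hmul : ((n : Int) + 1) * q = (n : Int) * q + q := by ring
      simp only [List.foldl_cons, List.foldl_nil, List.map_cons, List.map_nil]
      push_cast
      rw [shard_step_eq q r (n : Int)]

-- ===== VERDICT (by name: the statement is the Claim_ definition above) =====
theorem shard_batch_spec : Claim_equal_shard_batch := by
  intro bs nd _ hpre
  simp only [Spec_shard_batch, shard_batch, shard_batch_alt]
  rcases lt_trichotomy nd 0 with h | h | h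
  · rw [PySem.List.pyRange_one_eq_nil (by omega : nd ≤ 0)]
    simp
  · exact absurd h hpre
  · have hr : 0 ≤ PySem.Int.mod bs nd := PySem.Int.mod_nonneg bs h
    have hnd : nd = ((nd.toNat : Nat) : Int) := by omega
    rw [hnd]
    rw [hnd] at hr
    rw [shard_loop_eq (PySem.Int.floordiv bs (nd.toNat : Int)) (PySem.Int.mod bs (nd.toNat : Int)) hr nd.toNat]
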